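-- pv_equiv track=rewrite | github.com/MrBrantCode/unitest_baseline | mut_generate/mist_train_cf/cf_77288/solution.py | is_palindrome_with_vowels
-- ===== SOURCE A (Python) =====
-- def is_palindrome_with_vowels(s):
--     vowels = ['a', 'e', 'i', 'o', 'u']
--     str = ''
--     s = s.lower()   # switch to lowercase
--     for char in s:
--         if char.isalpha():  # if character is in alphabet
--             str += char
--             if char in vowels:
--                 vowels.remove(char)  # remove vowel from list
--     if len(vowels) != 0:  # check if all vowels are met
--         return False
--     return str == str[::-1]  # Compare the original and reversed string
-- ===== SOURCE B (Python) =====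
-- def is_palindrome_with_vowels(s):
--     filtered = ''.join(c for c in s.lower() if c.isalpha())
--     if not all(v in filtered for v in 'aeiou'):
--         return False
--     return filtered == filtered[::-1]
-- ===== Notes on version B (the rewrite author's own statement) =====
-- stated objective: idiomatic
-- what changed: Replaces the single mutating pass with per-character removal from a vowel list by two independent phases: build the filtered lowercase string once with join, then one membership check per vowel and a single palindrome comparison.
import Mathlib
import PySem

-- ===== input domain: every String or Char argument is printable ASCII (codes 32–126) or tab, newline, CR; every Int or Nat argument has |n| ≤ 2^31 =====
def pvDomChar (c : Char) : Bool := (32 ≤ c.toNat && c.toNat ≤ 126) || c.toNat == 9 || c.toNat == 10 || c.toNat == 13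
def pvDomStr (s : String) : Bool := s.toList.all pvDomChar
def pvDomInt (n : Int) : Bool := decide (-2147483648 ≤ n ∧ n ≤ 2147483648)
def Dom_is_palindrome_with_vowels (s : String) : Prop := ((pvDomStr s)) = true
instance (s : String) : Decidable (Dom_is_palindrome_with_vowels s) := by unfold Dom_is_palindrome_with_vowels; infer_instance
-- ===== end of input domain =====

-- B replaces A's single mutating pass (per-character vowel-list removal) by two
-- independent phases: build the filtered string once, then check vowel coverage
-- and palindromicity separately (objective: idiomatic).

-- ===== PORT A =====
-- one fold over the lowered characters, state = (remaining vowels, built string);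
-- vowels.remove(char) is reached only when char ∈ vowels, so remove? is some there
def is_palindrome_with_vowels (s : String) : Bool :=
  let st := (PySem.Chars.lower s.toList).foldl
    (fun (p : List Char × List Char) char =>
      if PySem.Chars.isalpha char then
        let acc := p.2 ++ [char]
        if p.1.contains char then ((PySem.List.remove? p.1 char).getD p.1, acc)
        else (p.1, acc)
      else p)
    (['a', 'e', 'i', 'o', 'u'], [])
  if st.1.length ≠ 0 then false
  else st.2 == st.2.reverse          -- str == str[::-1]

-- ===== PORT B =====
def is_palindrome_with_vowels_alt (s : String) : Bool :=
  let filtered := (PySem.Chars.lower s.toList).filter PySem.Chars.isalpha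
  if ¬ (['a', 'e', 'i', 'o', 'u'].all (fun v => filtered.contains v)) then false
  else filtered == filtered.reverse  -- filtered == filtered[::-1]

-- ===== PRECONDITION & SPEC =====
def Spec_is_palindrome_with_vowels (s : String) (out : Bool) : Prop := out = is_palindrome_with_vowels_alt s
instance (s : String) (out : Bool) : Decidable (Spec_is_palindrome_with_vowels s out) := by unfold Spec_is_palindrome_with_vowels; infer_instance

-- ===== CLAIM (what is proved, stated in full; the proofs are below) =====
def Claim_equal_is_palindrome_with_vowels : Prop := ∀ (s : String), Dom_is_palindrome_with_vowels s → Spec_is_palindrome_with_vowels s (is_palindrome_with_vowels s)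

-- ===== LEMMAS AND PROOFS =====

-- loop invariant for A's fold: starting from a duplicate-free vowel list v and
-- accumulator acc, the fold returns (v minus the vowels occurring in the
-- alphabetic filtering of l, acc ++ that filtering)
theorem pv_loopA (l : List Char) : ∀ (v acc : List Char), v.Nodup →
    l.foldl
      (fun (p : List Char × List Char) char =>
        if PySem.Chars.isalpha char then
          let acc := p.2 ++ [char]
          if p.1.contains char then ((PySem.List.remove? p.1 char).getD p.1, acc)
          else (p.1, acc)
        else p)
      (v, acc)
    = (v.filter (fun c => !(l.filter PySem.Chars.isalpha).contains c),
       acc ++ l.filter PySem.Chars.isalpha) := by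
  induction l with
  | nil => intro v acc _; simp
  | cons x l ih =>
    intro v acc hv
    by_cases hx : PySem.Chars.isalpha x
    · simp only [List.foldl_cons, if_pos hx]
      by_cases hmem : v.contains x
      · have hxv : x ∈ v := by simpa using hmem
        rw [if_pos hmem, PySem.List.remove?_eq_some_erase _ _ hxv, Option.getD_some,
            ih _ _ (hv.erase _), hv.erase_eq_filter]
        refine Prod.ext ?_ (by simp [hx])
        simp only [List.filter_filter, List.filter_cons, hx, if_true]
        apply List.filter_congr
        intro c _
        by_cases hcx : c = x <;> simp [hcx, bne]
      · rw [if_neg hmem, ih _ _ hv]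
        have hxv : x ∉ v := by simpa using hmem
        refine Prod.ext ?_ (by simp [hx])
        simp only [List.filter_cons, hx, if_true]
        apply List.filter_congr
        intro c hc
        have hcx : c ≠ x := fun h => hxv (h ▸ hc)
        simp [hcx]
    · simp only [List.foldl_cons, if_neg hx]
      rw [ih _ _ hv]
      simp [hx]

-- the exit test of A (some vowel still unremoved) is the negation of B's coverage test
theorem pv_cond (v F : List Char) :
    ((v.filter (fun c => !F.contains c)).length ≠ 0)
      ↔ ¬ (v.all (fun c => F.contains c) = true) := by
  simp [List.length_eq_zero_iff, List.filter_eq_nil_iff]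

-- ===== VERDICT (by name: the statement is the Claim_ definition above) =====
theorem is_palindrome_with_vowels_spec : Claim_equal_is_palindrome_with_vowels := by
  intro s _
  unfold Spec_is_palindrome_with_vowels is_palindrome_with_vowels is_palindrome_with_vowels_alt
  rw [pv_loopA _ _ _ (by decide)]
  simp only [List.nil_append]
  by_cases h : (['a', 'e', 'i', 'o', 'u'].all fun v =>
      (List.filter PySem.Chars.isalpha (PySem.Chars.lower s.toList)).contains v) = true
  · rw [if_neg (fun hc => (pv_cond _ _).mp hc h), if_neg (not_not_intro h)]
  · rw [if_pos ((pv_cond _ _).mpr h), if_pos h]
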